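-- pv_equiv track=rewrite | github.com/yoonseokham/algorithm | programmers/프로그래머스_빛의_경로_사이클.py | solution
-- ===== SOURCE A (Python) =====
-- from types import SimpleNamespace
--
-- def solution(grid):
--     answer = []
--     numToStr=['UP','RIGHT','DOWN','LEFT']
--     strToNum={'UP':0,'RIGHT':1,'DOWN':2,'LEFT':3}
--     didj=list(zip([-1,0,1,0],[0,1,0,-1]))
--     n=len(grid)
--     m=len(grid[0])
--     not_visit = [ [ [ False]*4 for j in range(m)] for i in range(n)]
--     def next_light_calculate(start):
--         curLightInfo=SimpleNamespace(i=start[0],j=start[1],direction=start[2])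
--         def location_calculate():
--             for direction,(i,j) in zip(numToStr,didj):
--                 if curLightInfo.direction == strToNum[direction]:
--                     curLightInfo.i = curLightInfo.i + i
--                     curLightInfo.j = curLightInfo.j + j
--             if curLightInfo.i<0: curLightInfo.i = n-1
--             elif curLightInfo.j<0: curLightInfo.j = m-1
--             elif curLightInfo.i>n-1: curLightInfo.i = 0
--             elif curLightInfo.j>m-1: curLightInfo.j = 0
--         def direction_calculate():
--             if grid[curLightInfo.i][curLightInfo.j] == 'L':
--                 if numToStr[curLightInfo.direction] == 'UP':
--                     curLightInfo.direction = strToNum['LEFT']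
--                 elif numToStr[curLightInfo.direction] == 'LEFT':
--                     curLightInfo.direction = strToNum['DOWN']
--                 elif numToStr[curLightInfo.direction] == 'DOWN':
--                     curLightInfo.direction = strToNum['RIGHT']
--                 elif numToStr[curLightInfo.direction] == 'RIGHT':
--                     curLightInfo.direction = strToNum['UP']
--             elif grid[curLightInfo.i][curLightInfo.j] == 'R':
--                 if numToStr[curLightInfo.direction] == 'UP':
--                     curLightInfo.direction = strToNum['RIGHT']
--                 elif numToStr[curLightInfo.direction] == 'LEFT':
--                     curLightInfo.direction = strToNum['UP']
--                 elif numToStr[curLightInfo.direction] == 'DOWN':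
--                     curLightInfo.direction = strToNum['LEFT']
--                 elif numToStr[curLightInfo.direction] == 'RIGHT':
--                     curLightInfo.direction = strToNum['DOWN']
--         location_calculate()
--         direction_calculate()
--         return (curLightInfo.i, curLightInfo.j, curLightInfo.direction)
--     def light_move(start):
--         length = 0
--         while not not_visit[start[0]][start[1]][start[2]]:
--             not_visit[start[0]][start[1]][start[2]]=True
--             start=next_light_calculate(start)
--             length += 1
--         answer.append(length)
--     for i in range(n):
--         for j in range(m):
--             for k in range(4):
--                 if not not_visit[i][j][k]:
--                     light_move((i,j,k))
--     return sorted(answer)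
-- ===== SOURCE B (Python) =====
-- def solution(grid):
--     n = len(grid)
--     m = len(grid[0])
--     didj = ((-1, 0), (0, 1), (1, 0), (0, -1))
--
--     def step(s):
--         i, j, d = s
--         i = (i + didj[d][0]) % n
--         j = (j + didj[d][1]) % m
--         c = grid[i][j]
--         if c == 'L':
--             d = (d + 3) % 4
--         elif c == 'R':
--             d = (d + 1) % 4
--         return (i, j, d)
--
--     # The step map is a permutation of the n*m*4 states, so the paths are exactly
--     # its cycles.  Count each cycle once, at its lexicographically smallest state,
--     # with no visited bookkeeping: walk from s0 until we either return to s0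
--     # (s0 leads its cycle: record the length) or meet a smaller state (some other
--     # start will count this cycle).
--     answer = []
--     for i in range(n):
--         for j in range(m):
--             for d in range(4):
--                 s0 = (i, j, d)
--                 length = 0
--                 s = s0
--                 while True:
--                     s = step(s)
--                     length += 1
--                     if s < s0:
--                         break
--                     if s == s0:
--                         answer.append(length)
--                         break
--     return sorted(answer)
-- ===== Notes on version B (the rewrite author's own statement) =====
-- stated objective: alternative
-- what changed: B drops A's global visited bookkeeping entirely: since the step map is a permutation of the n*m*4 states, B counts each cycle once at its lexicographically smallest state, walking from every state until it returns to the start (record the length) or meets a smaller state (abandon), using O(1) extra space instead of A's 3D visited array and discovery-order tracing.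
-- outside the precondition, e.g. on solution([]): A raises IndexError, B raises IndexError; on solution(['LR', 'L']): A raises IndexError, B raises IndexError
import Mathlib
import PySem

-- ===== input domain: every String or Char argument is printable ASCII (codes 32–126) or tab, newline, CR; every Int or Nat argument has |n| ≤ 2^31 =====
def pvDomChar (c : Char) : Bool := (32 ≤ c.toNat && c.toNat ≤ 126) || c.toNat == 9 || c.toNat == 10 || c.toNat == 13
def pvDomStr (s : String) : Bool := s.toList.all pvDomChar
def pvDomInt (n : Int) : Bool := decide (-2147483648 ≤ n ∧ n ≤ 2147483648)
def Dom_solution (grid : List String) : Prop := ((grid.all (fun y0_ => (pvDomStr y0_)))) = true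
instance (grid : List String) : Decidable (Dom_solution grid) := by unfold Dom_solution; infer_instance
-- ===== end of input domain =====

-- B drops A's global visited bookkeeping: the step map is a permutation of the
-- n*m*4 states, so B counts each cycle once at its lexicographically smallest
-- state, walking from every state until it returns (record the length) or meets
-- a smaller state (abandon); O(1) extra space (objective: alternative).

-- ===== PORT A =====
def pvNumToStr : List String := ["UP", "RIGHT", "DOWN", "LEFT"]
def pvStrToNum : PySem.Dict String Int :=
  PySem.Dict.ofList [("UP", 0), ("RIGHT", 1), ("DOWN", 2), ("LEFT", 3)]
def pvDidj : List (Int × Int) := [(-1, 0), (0, 1), (1, 0), (0, -1)]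

-- location_calculate: move one step in the current direction, then the wrap elif-chain
def pvLocationCalc (n m : Int) (s : Int × Int × Int) : Int × Int :=
  let p := (List.zip pvNumToStr pvDidj).foldl
    (fun (p : Int × Int) x =>
      if s.2.2 == pvStrToNum.getD x.1 0 then (p.1 + x.2.1, p.2 + x.2.2) else p)
    (s.1, s.2.1)
  if p.1 < 0 then (n - 1, p.2)
  else if p.2 < 0 then (p.1, m - 1)
  else if p.1 > n - 1 then (0, p.2)
  else if p.2 > m - 1 then (p.1, 0)
  else p

-- direction_calculate: the L/R string-table turn chains
def pvDirectionCalc (grid : List String) (i j d : Int) : Int :=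
  let c := (PySem.List.pyGet? grid i).bind (fun row => PySem.Str.pyGet? row j)
  if c = some 'L' then
    if PySem.List.pyGet? pvNumToStr d = some "UP" then pvStrToNum.getD "LEFT" 0
    else if PySem.List.pyGet? pvNumToStr d = some "LEFT" then pvStrToNum.getD "DOWN" 0
    else if PySem.List.pyGet? pvNumToStr d = some "DOWN" then pvStrToNum.getD "RIGHT" 0
    else if PySem.List.pyGet? pvNumToStr d = some "RIGHT" then pvStrToNum.getD "UP" 0
    else d
  else if c = some 'R' then
    if PySem.List.pyGet? pvNumToStr d = some "UP" then pvStrToNum.getD "RIGHT" 0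
    else if PySem.List.pyGet? pvNumToStr d = some "LEFT" then pvStrToNum.getD "UP" 0
    else if PySem.List.pyGet? pvNumToStr d = some "DOWN" then pvStrToNum.getD "LEFT" 0
    else if PySem.List.pyGet? pvNumToStr d = some "RIGHT" then pvStrToNum.getD "DOWN" 0
    else d
  else d

def pvNextLight (grid : List String) (n m : Int) (s : Int × Int × Int) : Int × Int × Int :=
  let p := pvLocationCalc n m s
  (p.1, p.2, pvDirectionCalc grid p.1 p.2 s.2.2)

-- not_visit[s] lookup (getD true is a totality guard: inside Pre_ every lookup is in range)
def pvVis (v : List (List (List Bool))) (s : Int × Int × Int) : Bool :=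
  ((((PySem.List.pyGet? v s.1).bind (fun r => PySem.List.pyGet? r s.2.1)).bind
      (fun q => PySem.List.pyGet? q s.2.2)).getD true)

-- not_visit[s] = True (indices are in range and nonnegative inside Pre_)
def pvSet3 (v : List (List (List Bool))) (s : Int × Int × Int) : List (List (List Bool)) :=
  v.modify s.1.toNat (fun r => r.modify s.2.1.toNat (fun q => q.set s.2.2.toNat true))

-- light_move's while loop; fuel bounds the iteration count (never reached inside Pre_)
def pvLightMove (grid : List String) (n m : Int) :
    Nat → List (List (List Bool)) → (Int × Int × Int) → Int → Int × List (List (List Bool))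
  | 0, v, _, len => (len, v)
  | fuel + 1, v, s, len =>
    if pvVis v s then (len, v)
    else pvLightMove grid n m fuel (pvSet3 v s) (pvNextLight grid n m s) (len + 1)

def solution (grid : List String) : List Int :=
  let n : Int := grid.length
  let m : Int := PySem.Str.len ((PySem.List.pyGet? grid 0).getD "")
  let fuel := n.toNat * m.toNat * 4 + 1
  let init := List.replicate n.toNat (List.replicate m.toNat (List.replicate 4 false))
  let r := (PySem.List.pyRange 0 n 1).foldl (fun acc i =>
    (PySem.List.pyRange 0 m 1).foldl (fun acc j =>
      (PySem.List.pyRange 0 4 1).foldl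
        (fun (acc : List Int × List (List (List Bool))) k =>
          if pvVis acc.2 (i, j, k) then acc
          else
            let r := pvLightMove grid n m fuel acc.2 (i, j, k) 0
            (acc.1 ++ [r.1], r.2)) acc) acc) ([], init)
  PySem.List.sorted r.1 (fun x => x) false

-- ===== PORT B =====
-- Python tuple comparison s < s0 on (i, j, d) triples
def pvLt (a b : Int × Int × Int) : Bool :=
  decide (a.1 < b.1) ||
    (decide (a.1 = b.1) &&
      (decide (a.2.1 < b.2.1) || (decide (a.2.1 = b.2.1) && decide (a.2.2 < b.2.2))))

-- step(s): move with modular wrap, then turn by the cell's mirror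
def pvStepB (grid : List String) (n m : Int) (s : Int × Int × Int) : Int × Int × Int :=
  let dd := (PySem.List.pyGet? pvDidj s.2.2).getD (0, 0)  -- d is 0..3 wherever called
  let i := PySem.Int.mod (s.1 + dd.1) n
  let j := PySem.Int.mod (s.2.1 + dd.2) m
  let c := (PySem.List.pyGet? grid i).bind (fun row => PySem.Str.pyGet? row j)
  let d := if c = some 'L' then PySem.Int.mod (s.2.2 + 3) 4
           else if c = some 'R' then PySem.Int.mod (s.2.2 + 1) 4
           else s.2.2
  (i, j, d)

-- the 'while True' walk; fuel bounds the iteration count (never reached inside Pre_);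
-- some length = the start led its cycle, none = a smaller state was met
def pvWalk (grid : List String) (n m : Int) :
    Nat → (Int × Int × Int) → (Int × Int × Int) → Int → Option Int
  | 0, _, _, _ => none
  | fuel + 1, s0, s, len =>
    let t := pvStepB grid n m s
    if pvLt t s0 then none
    else if t = s0 then some (len + 1)
    else pvWalk grid n m fuel s0 t (len + 1)

def solution_alt (grid : List String) : List Int :=
  let n : Int := grid.length
  let m : Int := PySem.Str.len ((PySem.List.pyGet? grid 0).getD "")
  let fuel := n.toNat * m.toNat * 4 + 1
  let ans := (PySem.List.pyRange 0 n 1).foldl (fun acc i =>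
    (PySem.List.pyRange 0 m 1).foldl (fun acc j =>
      (PySem.List.pyRange 0 4 1).foldl
        (fun (acc : List Int) d =>
          match pvWalk grid n m fuel (i, j, d) (i, j, d) 0 with
          | some len => acc ++ [len]
          | none => acc) acc) acc) []
  PySem.List.sorted ans (fun x => x) false

-- ===== PRECONDITION & SPEC =====
-- Pre_ excludes exactly the inputs where A raises IndexError: the empty grid (grid[0])
-- and grids having a row shorter than the first row (grid[ni][nj] on such a row).
def Pre_solution (grid : List String) : Prop :=
  grid ≠ [] ∧ ∀ s ∈ grid, PySem.Str.len (grid.headD "") ≤ PySem.Str.len s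
instance (grid : List String) : Decidable (Pre_solution grid) := by
  unfold Pre_solution; infer_instance
def pvWitness_solution : List String := ["SL", "RR"]
def Spec_solution (grid : List String) (out : List Int) : Prop := out = solution_alt grid
instance (grid : List String) (out : List Int) : Decidable (Spec_solution grid out) := by
  unfold Spec_solution; infer_instance

-- ===== CLAIM (what is proved, stated in full; the proofs are below) =====
def Claim_equal_solution : Prop :=
  ∀ (grid : List String), Dom_solution grid → Pre_solution grid →
    Spec_solution grid (solution grid)

-- ===== LEMMAS AND PROOFS =====

-- state in range
def pvInR (n m : Int) (s : Int × Int × Int) : Prop :=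
  0 ≤ s.1 ∧ s.1 < n ∧ 0 ≤ s.2.1 ∧ s.2.1 < m ∧ 0 ≤ s.2.2 ∧ s.2.2 < 4

-- all states, in lexicographic order
def pvStates (n m : Int) : List (Int × Int × Int) :=
  (PySem.List.pyRange 0 n 1).flatMap fun i =>
    (PySem.List.pyRange 0 m 1).flatMap fun j =>
      (PySem.List.pyRange 0 4 1).map fun d => (i, j, d)

-- set-level image of A's while loop (proof device)
def pvTraceS (f : (Int × Int × Int) → (Int × Int × Int)) :
    Nat → PySem.Set (Int × Int × Int) → (Int × Int × Int) → Int →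
    Int × PySem.Set (Int × Int × Int)
  | 0, seen, _, len => (len, seen)
  | fuel + 1, seen, s, len =>
    if PySem.Set.contains seen s then (len, seen)
    else pvTraceS f fuel (PySem.Set.add seen s) (f s) (len + 1)

-- the 3D visited array determined by a visited set
def pvMkVis (n m : Int) (seen : PySem.Set (Int × Int × Int)) : List (List (List Bool)) :=
  (PySem.List.pyRange 0 n 1).map fun a =>
    (PySem.List.pyRange 0 m 1).map fun b =>
      (PySem.List.pyRange 0 4 1).map fun c =>
        PySem.Set.contains seen (a, b, c)

def pvReach (f : (Int × Int × Int) → (Int × Int × Int)) (u t : Int × Int × Int) : Prop :=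
  ∃ k : Nat, f^[k] u = t

-- explicit inverse of pvStepB (used only to prove injectivity)
def pvInvB (grid : List String) (n m : Int) (s : Int × Int × Int) : Int × Int × Int :=
  let c := (PySem.List.pyGet? grid s.1).bind (fun row => PySem.Str.pyGet? row s.2.1)
  let d := if c = some 'L' then PySem.Int.mod (s.2.2 + 1) 4
           else if c = some 'R' then PySem.Int.mod (s.2.2 + 3) 4
           else s.2.2
  let dd := (PySem.List.pyGet? pvDidj d).getD (0, 0)
  (PySem.Int.mod (s.1 - dd.1) n, PySem.Int.mod (s.2.1 - dd.2) m, d)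

theorem pvLt_iff (a b : Int × Int × Int) :
    pvLt a b = true ↔
      (a.1 < b.1 ∨ (a.1 = b.1 ∧ (a.2.1 < b.2.1 ∨ (a.2.1 = b.2.1 ∧ a.2.2 < b.2.2)))) := by
  simp [pvLt]

theorem pvLt_irrefl (a : Int × Int × Int) : pvLt a a = false := by
  simp [pvLt]

theorem pvLt_asymm (a b : Int × Int × Int) (h1 : pvLt a b = true) (h2 : pvLt b a = true) :
    False := by
  rw [pvLt_iff] at h1 h2; omega

theorem pvModId (i n : Int) (h0 : 0 ≤ i) (h1 : i < n) : PySem.Int.mod i n = i := by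
  rw [PySem.Int.mod_eq_emod_of_pos (by omega)]
  exact Int.emod_eq_of_lt h0 h1

theorem pvModNegOne (n : Int) (hn : 0 < n) : PySem.Int.mod (-1) n = n - 1 := by
  rw [PySem.Int.mod_eq_emod_of_pos hn]
  have h1 : ((-1 : Int) + n) % n = (-1) % n := Int.add_emod_right (-1) n
  have h2 : (n - 1) % n = n - 1 := Int.emod_eq_of_lt (by omega) (by omega)
  calc (-1 : Int) % n = (-1 + n) % n := h1.symm
    _ = (n - 1) % n := by ring_nf
    _ = n - 1 := h2

theorem pvModDown (i n : Int) (h0 : 0 ≤ i) (h1 : i < n) :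
    PySem.Int.mod (i - 1) n = if i - 1 < 0 then n - 1 else i - 1 := by
  split_ifs with h
  · have hi : i = 0 := by omega
    subst hi
    simpa using pvModNegOne n (by omega)
  · exact pvModId _ _ (by omega) (by omega)

theorem pvModUp (i n : Int) (h0 : 0 ≤ i) (h1 : i < n) :
    PySem.Int.mod (i + 1) n = if i + 1 > n - 1 then 0 else i + 1 := by
  split_ifs with h
  · have hi : i + 1 = n := by omega
    rw [hi, PySem.Int.mod_eq_emod_of_pos (by omega), Int.emod_self]
  · exact pvModId _ _ (by omega) (by omega)

theorem pvUnwrap (i di n : Int) (h0 : 0 ≤ i) (h1 : i < n)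
    (hdi : di = -1 ∨ di = 0 ∨ di = 1) :
    PySem.Int.mod (PySem.Int.mod (i + di) n - di) n = i := by
  rcases hdi with rfl | rfl | rfl
  · have h2 : i + -1 = i - 1 := by ring
    rw [h2, pvModDown i n h0 h1]
    split_ifs with h
    · have h3 : n - 1 - -1 = n := by ring
      rw [h3, PySem.Int.mod_eq_emod_of_pos (by omega), Int.emod_self]; omega
    · have h3 : i - 1 - -1 = i := by ring
      rw [h3]; exact pvModId _ _ h0 h1
  · simp only [add_zero, sub_zero, pvModId i n h0 h1]
  · rw [pvModUp i n h0 h1]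
    split_ifs with h
    · have h2 : i = n - 1 := by omega
      have h3 : (0 : Int) - 1 = -1 := by ring
      rw [h3, pvModNegOne n (by omega)]; omega
    · have h3 : i + 1 - 1 = i := by ring
      rw [h3]; exact pvModId _ _ h0 h1

-- B's step stays in range
theorem pvStepB_inR (grid : List String) (n m : Int) (s : Int × Int × Int)
    (h : pvInR n m s) : pvInR n m (pvStepB grid n m s) := by
  obtain ⟨i, j, d⟩ := s
  obtain ⟨h1, h2, h3, h4, h5, h6⟩ := h
  simp only at h1 h2 h3 h4 h5 h6
  have hn : (0:Int) < n := by omega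
  have hm : (0:Int) < m := by omega
  simp only [pvStepB, pvInR]
  split_ifs
  · exact ⟨PySem.Int.mod_nonneg _ hn, PySem.Int.mod_lt _ hn,
      PySem.Int.mod_nonneg _ hm, PySem.Int.mod_lt _ hm,
      PySem.Int.mod_nonneg _ (by norm_num), PySem.Int.mod_lt _ (by norm_num)⟩
  · exact ⟨PySem.Int.mod_nonneg _ hn, PySem.Int.mod_lt _ hn,
      PySem.Int.mod_nonneg _ hm, PySem.Int.mod_lt _ hm,
      PySem.Int.mod_nonneg _ (by norm_num), PySem.Int.mod_lt _ (by norm_num)⟩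
  · exact ⟨PySem.Int.mod_nonneg _ hn, PySem.Int.mod_lt _ hn,
      PySem.Int.mod_nonneg _ hm, PySem.Int.mod_lt _ hm, h5, h6⟩

-- A's step equals B's step on in-range states
theorem pvStep_eq (grid : List String) (n m : Int) (s : Int × Int × Int)
    (hs : pvInR n m s) : pvNextLight grid n m s = pvStepB grid n m s := by
  obtain ⟨i, j, d⟩ := s
  obtain ⟨h1, h2, h3, h4, h5, h6⟩ := hs
  simp only at h1 h2 h3 h4 h5 h6
  have eUP : pvStrToNum.getD "UP" 0 = 0 := by decide
  have eRI : pvStrToNum.getD "RIGHT" 0 = 1 := by decide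
  have eDO : pvStrToNum.getD "DOWN" 0 = 2 := by decide
  have eLE : pvStrToNum.getD "LEFT" 0 = 3 := by decide
  have hd : d = 0 ∨ d = 1 ∨ d = 2 ∨ d = 3 := by omega
  have nUP : PySem.List.pyGet? pvNumToStr (0:Int) = some "UP" := by decide
  have nRI : PySem.List.pyGet? pvNumToStr (1:Int) = some "RIGHT" := by decide
  have nDO : PySem.List.pyGet? pvNumToStr (2:Int) = some "DOWN" := by decide
  have nLE : PySem.List.pyGet? pvNumToStr (3:Int) = some "LEFT" := by decide
  have dd0 : (PySem.List.pyGet? pvDidj (0:Int)).getD (0,0) = ((-1:Int), (0:Int)) := by decide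
  have dd1 : (PySem.List.pyGet? pvDidj (1:Int)).getD (0,0) = ((0:Int), (1:Int)) := by decide
  have dd2 : (PySem.List.pyGet? pvDidj (2:Int)).getD (0,0) = ((1:Int), (0:Int)) := by decide
  have dd3 : (PySem.List.pyGet? pvDidj (3:Int)).getD (0,0) = ((0:Int), (-1:Int)) := by decide
  rcases hd with rfl | rfl | rfl | rfl
  · simp only [pvNextLight, pvLocationCalc, pvDirectionCalc, pvStepB, pvNumToStr,
      pvDidj, pvDidj, List.zip, List.zipWith, List.foldl_cons, List.foldl_nil,
      eUP, eRI, eDO, eLE, nUP, nRI, nDO, nLE, dd0]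
    norm_num [show ¬ (j < (0:Int)) from by omega, show ¬ (j > m - 1) from by omega,
      show ¬ (i - 1 > n - 1) from by omega]
    have hP : (if i < 1 then ((n - 1 : Int), j) else if n < i then ((0:Int), j) else (i + -1, j))
        = (PySem.Int.mod (i + -1) n, PySem.Int.mod j m) := by
      rw [show i + (-1:Int) = i - 1 from by ring, pvModDown i n h1 h2, pvModId j m h3 h4]
      split_ifs <;> first | rfl | (exfalso; omega) | (apply Prod.ext <;> simp <;> omega)
    rw [hP]
    simp
  · simp only [pvNextLight, pvLocationCalc, pvDirectionCalc, pvStepB, pvNumToStr,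
      pvDidj, pvDidj, List.zip, List.zipWith, List.foldl_cons, List.foldl_nil,
      eUP, eRI, eDO, eLE, nUP, nRI, nDO, nLE, dd1]
    norm_num [show ¬ (i < (0:Int)) from by omega, show ¬ (i > n - 1) from by omega,
      show ¬ (j + 1 < (0:Int)) from by omega, String.reduceEq]
    have hP : (if m ≤ j + 1 then (i, (0:Int)) else (i, j + 1))
        = (PySem.Int.mod i n, PySem.Int.mod (j + 1) m) := by
      rw [pvModId i n h1 h2, pvModUp j m h3 h4]
      split_ifs <;> first | rfl | (exfalso; omega) | (apply Prod.ext <;> simp <;> omega)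
    rw [hP]
    simp
  · simp only [pvNextLight, pvLocationCalc, pvDirectionCalc, pvStepB, pvNumToStr,
      pvDidj, pvDidj, List.zip, List.zipWith, List.foldl_cons, List.foldl_nil,
      eUP, eRI, eDO, eLE, nUP, nRI, nDO, nLE, dd2]
    norm_num [show ¬ (i + 1 < (0:Int)) from by omega, show ¬ (j < (0:Int)) from by omega,
      show ¬ (j > m - 1) from by omega, String.reduceEq]
    have hP : (if n ≤ i + 1 then ((0:Int), j) else (i + 1, j))
        = (PySem.Int.mod (i + 1) n, PySem.Int.mod j m) := by
      rw [pvModUp i n h1 h2, pvModId j m h3 h4]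
      split_ifs <;> first | rfl | (exfalso; omega) | (apply Prod.ext <;> simp <;> omega)
    rw [hP]
    simp
  · simp only [pvNextLight, pvLocationCalc, pvDirectionCalc, pvStepB, pvNumToStr,
      pvDidj, pvDidj, List.zip, List.zipWith, List.foldl_cons, List.foldl_nil,
      eUP, eRI, eDO, eLE, nUP, nRI, nDO, nLE, dd3]
    norm_num [show ¬ (i < (0:Int)) from by omega, show ¬ (i > n - 1) from by omega,
      show ¬ (m < j) from by omega, String.reduceEq, Int.reduceToNat,
      List.getElem_cons_succ, List.getElem_cons_zero]
    have hP : (if j < 1 then (i, m - 1) else (i, j + -1))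
        = (PySem.Int.mod i n, PySem.Int.mod (j + -1) m) := by
      rw [show j + (-1:Int) = j - 1 from by ring, pvModId i n h1 h2, pvModDown j m h3 h4]
      split_ifs <;> first | rfl | (exfalso; omega) | (apply Prod.ext <;> simp <;> omega)
    rw [hP]
    simp

theorem pvInvB_step (grid : List String) (n m : Int) (s : Int × Int × Int)
    (h : pvInR n m s) : pvInvB grid n m (pvStepB grid n m s) = s := by
  obtain ⟨i, j, d⟩ := s
  obtain ⟨h1, h2, h3, h4, h5, h6⟩ := h
  simp only at h1 h2 h3 h4 h5 h6
  have dd0 : (PySem.List.pyGet? pvDidj (0:Int)).getD (0,0) = ((-1:Int), (0:Int)) := by decide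
  have dd1 : (PySem.List.pyGet? pvDidj (1:Int)).getD (0,0) = ((0:Int), (1:Int)) := by decide
  have dd2 : (PySem.List.pyGet? pvDidj (2:Int)).getD (0,0) = ((1:Int), (0:Int)) := by decide
  have dd3 : (PySem.List.pyGet? pvDidj (3:Int)).getD (0,0) = ((0:Int), (-1:Int)) := by decide
  have hd : d = 0 ∨ d = 1 ∨ d = 2 ∨ d = 3 := by omega
  rcases hd with rfl | rfl | rfl | rfl
  · simp only [pvStepB, pvInvB, dd0]
    by_cases hcL : ((PySem.List.pyGet? grid (PySem.Int.mod (i + -1) n)).bind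
        fun row => PySem.Str.pyGet? row (PySem.Int.mod (j + 0) m)) = some 'L'
    · simp only [hcL, Option.some.injEq, Char.reduceEq, reduceCtorEq, reduceIte]
      rw [show PySem.Int.mod (PySem.Int.mod ((0:Int) + 3) 4 + 1) 4 = 0 from by decide, dd0]
      simp only [Prod.ext_iff]
      exact ⟨pvUnwrap i (-1) n h1 h2 (by norm_num), pvUnwrap j (0) m h3 h4 (by norm_num), trivial⟩
    · by_cases hcR : ((PySem.List.pyGet? grid (PySem.Int.mod (i + -1) n)).bind
        fun row => PySem.Str.pyGet? row (PySem.Int.mod (j + 0) m)) = some 'R'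
      · simp only [hcR, Option.some.injEq, Char.reduceEq, reduceCtorEq, reduceIte]
        rw [show PySem.Int.mod (PySem.Int.mod ((0:Int) + 1) 4 + 3) 4 = 0 from by decide, dd0]
        simp only [Prod.ext_iff]
        exact ⟨pvUnwrap i (-1) n h1 h2 (by norm_num), pvUnwrap j (0) m h3 h4 (by norm_num), trivial⟩
      · simp only [if_neg hcL, if_neg hcR, dd0]
        simp only [Prod.ext_iff]
        exact ⟨pvUnwrap i (-1) n h1 h2 (by norm_num), pvUnwrap j (0) m h3 h4 (by norm_num), trivial⟩
  · simp only [pvStepB, pvInvB, dd1]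
    by_cases hcL : ((PySem.List.pyGet? grid (PySem.Int.mod (i + 0) n)).bind
        fun row => PySem.Str.pyGet? row (PySem.Int.mod (j + 1) m)) = some 'L'
    · simp only [hcL, Option.some.injEq, Char.reduceEq, reduceCtorEq, reduceIte]
      rw [show PySem.Int.mod (PySem.Int.mod ((1:Int) + 3) 4 + 1) 4 = 1 from by decide, dd1]
      simp only [Prod.ext_iff]
      exact ⟨pvUnwrap i (0) n h1 h2 (by norm_num), pvUnwrap j (1) m h3 h4 (by norm_num), trivial⟩
    · by_cases hcR : ((PySem.List.pyGet? grid (PySem.Int.mod (i + 0) n)).bind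
        fun row => PySem.Str.pyGet? row (PySem.Int.mod (j + 1) m)) = some 'R'
      · simp only [hcR, Option.some.injEq, Char.reduceEq, reduceCtorEq, reduceIte]
        rw [show PySem.Int.mod (PySem.Int.mod ((1:Int) + 1) 4 + 3) 4 = 1 from by decide, dd1]
        simp only [Prod.ext_iff]
        exact ⟨pvUnwrap i (0) n h1 h2 (by norm_num), pvUnwrap j (1) m h3 h4 (by norm_num), trivial⟩
      · simp only [if_neg hcL, if_neg hcR, dd1]
        simp only [Prod.ext_iff]
        exact ⟨pvUnwrap i (0) n h1 h2 (by norm_num), pvUnwrap j (1) m h3 h4 (by norm_num), trivial⟩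
  · simp only [pvStepB, pvInvB, dd2]
    by_cases hcL : ((PySem.List.pyGet? grid (PySem.Int.mod (i + 1) n)).bind
        fun row => PySem.Str.pyGet? row (PySem.Int.mod (j + 0) m)) = some 'L'
    · simp only [hcL, Option.some.injEq, Char.reduceEq, reduceCtorEq, reduceIte]
      rw [show PySem.Int.mod (PySem.Int.mod ((2:Int) + 3) 4 + 1) 4 = 2 from by decide, dd2]
      simp only [Prod.ext_iff]
      exact ⟨pvUnwrap i (1) n h1 h2 (by norm_num), pvUnwrap j (0) m h3 h4 (by norm_num), trivial⟩
    · by_cases hcR : ((PySem.List.pyGet? grid (PySem.Int.mod (i + 1) n)).bind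
        fun row => PySem.Str.pyGet? row (PySem.Int.mod (j + 0) m)) = some 'R'
      · simp only [hcR, Option.some.injEq, Char.reduceEq, reduceCtorEq, reduceIte]
        rw [show PySem.Int.mod (PySem.Int.mod ((2:Int) + 1) 4 + 3) 4 = 2 from by decide, dd2]
        simp only [Prod.ext_iff]
        exact ⟨pvUnwrap i (1) n h1 h2 (by norm_num), pvUnwrap j (0) m h3 h4 (by norm_num), trivial⟩
      · simp only [if_neg hcL, if_neg hcR, dd2]
        simp only [Prod.ext_iff]
        exact ⟨pvUnwrap i (1) n h1 h2 (by norm_num), pvUnwrap j (0) m h3 h4 (by norm_num), trivial⟩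
  · simp only [pvStepB, pvInvB, dd3]
    by_cases hcL : ((PySem.List.pyGet? grid (PySem.Int.mod (i + 0) n)).bind
        fun row => PySem.Str.pyGet? row (PySem.Int.mod (j + -1) m)) = some 'L'
    · simp only [hcL, Option.some.injEq, Char.reduceEq, reduceCtorEq, reduceIte]
      rw [show PySem.Int.mod (PySem.Int.mod ((3:Int) + 3) 4 + 1) 4 = 3 from by decide, dd3]
      simp only [Prod.ext_iff]
      exact ⟨pvUnwrap i (0) n h1 h2 (by norm_num), pvUnwrap j (-1) m h3 h4 (by norm_num), trivial⟩
    · by_cases hcR : ((PySem.List.pyGet? grid (PySem.Int.mod (i + 0) n)).bind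
        fun row => PySem.Str.pyGet? row (PySem.Int.mod (j + -1) m)) = some 'R'
      · simp only [hcR, Option.some.injEq, Char.reduceEq, reduceCtorEq, reduceIte]
        rw [show PySem.Int.mod (PySem.Int.mod ((3:Int) + 1) 4 + 3) 4 = 3 from by decide, dd3]
        simp only [Prod.ext_iff]
        exact ⟨pvUnwrap i (0) n h1 h2 (by norm_num), pvUnwrap j (-1) m h3 h4 (by norm_num), trivial⟩
      · simp only [if_neg hcL, if_neg hcR, dd3]
        simp only [Prod.ext_iff]
        exact ⟨pvUnwrap i (0) n h1 h2 (by norm_num), pvUnwrap j (-1) m h3 h4 (by norm_num), trivial⟩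

theorem pvStepB_inj (grid : List String) (n m : Int) (a b : Int × Int × Int)
    (ha : pvInR n m a) (hb : pvInR n m b)
    (h : pvStepB grid n m a = pvStepB grid n m b) : a = b := by
  rw [← pvInvB_step grid n m a ha, ← pvInvB_step grid n m b hb, h]

theorem pvMem_states (n m : Int) (s : Int × Int × Int) :
    s ∈ pvStates n m ↔ pvInR n m s := by
  obtain ⟨i, j, d⟩ := s
  simp only [pvStates, List.mem_flatMap, List.mem_map, PySem.List.mem_pyRange_one,
    pvInR, Prod.mk.injEq]
  constructor
  · rintro ⟨a, ⟨ha1, ha2⟩, b, ⟨hb1, hb2⟩, c, ⟨hc1, hc2⟩, rfl, rfl, rfl⟩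
    exact ⟨ha1, ha2, hb1, hb2, hc1, hc2⟩
  · rintro ⟨p1, p2, p3, p4, p5, p6⟩
    exact ⟨i, ⟨p1, p2⟩, j, ⟨p3, p4⟩, d, ⟨p5, p6⟩, rfl, rfl, rfl⟩

theorem pvStates_pairwise (n m : Int) :
    (pvStates n m).Pairwise (fun a b => pvLt a b = true) := by
  unfold pvStates
  rw [List.pairwise_flatMap]
  constructor
  · intro a _
    rw [List.pairwise_flatMap]
    constructor
    · intro b _
      rw [List.pairwise_map]
      refine (PySem.List.pairwise_lt_pyRange_one (a := 0) (b := 4)).imp ?_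
      intro d1 d2 h
      rw [pvLt_iff]
      exact Or.inr ⟨rfl, Or.inr ⟨rfl, h⟩⟩
    · refine (PySem.List.pairwise_lt_pyRange_one (a := 0) (b := m)).imp ?_
      intro b1 b2 hb x hx y hy
      simp only [List.mem_map] at hx hy
      obtain ⟨d1, _, rfl⟩ := hx
      obtain ⟨d2, _, rfl⟩ := hy
      rw [pvLt_iff]
      exact Or.inr ⟨rfl, Or.inl hb⟩
  · refine (PySem.List.pairwise_lt_pyRange_one (a := 0) (b := n)).imp ?_
    intro a1 a2 ha x hx y hy
    simp only [List.mem_flatMap, List.mem_map] at hx hy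
    obtain ⟨j1, _, d1, _, rfl⟩ := hx
    obtain ⟨j2, _, d2, _, rfl⟩ := hy
    rw [pvLt_iff]
    exact Or.inl ha

theorem pvStates_length (n m : Int) :
    (pvStates n m).length = n.toNat * m.toNat * 4 := by
  simp [pvStates, List.length_flatMap, Function.comp_def, PySem.List.length_pyRange_one,
    List.map_const', List.sum_replicate, smul_eq_mul, mul_comm, mul_assoc, mul_left_comm]

-- iterates stay in range
theorem pvIter_inR (grid : List String) (n m : Int) (k : Nat) (s : Int × Int × Int)
    (hs : pvInR n m s) : pvInR n m ((pvStepB grid n m)^[k] s) := by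
  induction k with
  | zero => simpa using hs
  | succ k ih =>
    rw [Function.iterate_succ_apply']
    exact pvStepB_inR grid n m _ ih

theorem pvCancel (grid : List String) (n m : Int) (k : Nat) (a b : Int × Int × Int)
    (ha : pvInR n m a) (hb : pvInR n m b)
    (h : (pvStepB grid n m)^[k] a = (pvStepB grid n m)^[k] b) : a = b := by
  induction k generalizing a b with
  | zero => simpa using h
  | succ k ih =>
    rw [Function.iterate_succ_apply, Function.iterate_succ_apply] at h
    exact pvStepB_inj grid n m a b ha hb
      (ih _ _ (pvStepB_inR grid n m a ha) (pvStepB_inR grid n m b hb) h)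

theorem pvExistsPeriod (grid : List String) (n m : Int) (s : Int × Int × Int)
    (hs : pvInR n m s) :
    ∃ L : Nat, 0 < L ∧ L ≤ n.toNat * m.toNat * 4 ∧ (pvStepB grid n m)^[L] s = s := by
  have hlen := pvStates_length n m
  have hmaps : ∀ k ∈ Finset.range ((pvStates n m).length + 1),
      (pvStepB grid n m)^[k] s ∈ (pvStates n m).toFinset := by
    intro k _
    rw [List.mem_toFinset, pvMem_states]
    exact pvIter_inR grid n m k s hs
  have hcard : ((pvStates n m).toFinset).card < (Finset.range ((pvStates n m).length + 1)).card := by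
    rw [Finset.card_range]
    exact Nat.lt_succ_of_le (List.toFinset_card_le _)
  obtain ⟨a, ha, b, hb, hne, heq⟩ :=
    Finset.exists_ne_map_eq_of_card_lt_of_maps_to hcard hmaps
  rw [Finset.mem_range] at ha hb
  rcases Nat.lt_or_ge a b with hab | hab
  · have h1 : (pvStepB grid n m)^[a] ((pvStepB grid n m)^[b - a] s) = (pvStepB grid n m)^[a] s := by
      rw [← Function.iterate_add_apply, show a + (b - a) = b from by omega, ← heq]
    have h2 := pvCancel grid n m a _ s (pvIter_inR grid n m _ s hs) hs h1
    exact ⟨b - a, by omega, by omega, h2⟩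
  · have hba : b < a := by omega
    have h1 : (pvStepB grid n m)^[b] ((pvStepB grid n m)^[a - b] s) = (pvStepB grid n m)^[b] s := by
      rw [← Function.iterate_add_apply, show b + (a - b) = a from by omega, heq]
    have h2 := pvCancel grid n m b _ s (pvIter_inR grid n m _ s hs) hs h1
    exact ⟨a - b, by omega, by omega, h2⟩

theorem pvPeriodMod (f : (Int × Int × Int) → (Int × Int × Int)) (s : Int × Int × Int)
    (L : Nat) (hL0 : 0 < L) (hfix : f^[L] s = s) (k : Nat) :
    f^[k] s = f^[k % L] s := by
  have hq : ∀ q : Nat, f^[L * q] s = s := by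
    intro q
    induction q with
    | zero => simp
    | succ q ih =>
      have : L * (q + 1) = L * q + L := by ring
      rw [this, Function.iterate_add_apply, hfix, ih]
  conv_lhs => rw [← Nat.mod_add_div k L]
  rw [Function.iterate_add_apply, hq]

theorem pvDistinct (grid : List String) (n m : Int) (s : Int × Int × Int)
    (hs : pvInR n m s) (L : Nat)
    (hmin : ∀ k, 0 < k → k < L → (pvStepB grid n m)^[k] s ≠ s)
    (a b : Nat) (hab : a < b) (hbL : b < L) :
    (pvStepB grid n m)^[a] s ≠ (pvStepB grid n m)^[b] s := by
  intro h
  have hb : b = a + (b - a) := by omega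
  rw [hb, Function.iterate_add_apply] at h
  have := pvCancel grid n m a s ((pvStepB grid n m)^[b - a] s) hs
    (pvIter_inR grid n m _ s hs) h
  exact hmin (b - a) (by omega) (by omega) this.symm

theorem pvReach_symm (grid : List String) (n m : Int) (s t : Int × Int × Int)
    (hs : pvInR n m s) (h : pvReach (pvStepB grid n m) s t) :
    pvReach (pvStepB grid n m) t s := by
  obtain ⟨L, hL0, _, hfix⟩ := pvExistsPeriod grid n m s hs
  obtain ⟨k, rfl⟩ := h
  rcases Nat.eq_zero_or_pos (k % L) with hr | hr
  · refine ⟨0, ?_⟩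
    rw [pvPeriodMod _ s L hL0 hfix k, hr]
    simp
  · refine ⟨L - k % L, ?_⟩
    rw [pvPeriodMod _ s L hL0 hfix k, ← Function.iterate_add_apply]
    have : L - k % L + k % L = L := by
      have := Nat.mod_lt k hL0; omega
    rw [this, hfix]

theorem pvReach_trans (f : (Int × Int × Int) → (Int × Int × Int))
    (a b c : Int × Int × Int) (h1 : pvReach f a b) (h2 : pvReach f b c) :
    pvReach f a c := by
  obtain ⟨k, rfl⟩ := h1
  obtain ⟨l, rfl⟩ := h2
  exact ⟨l + k, Function.iterate_add_apply f l k a⟩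

theorem pvReach_orbit (f : (Int × Int × Int) → (Int × Int × Int)) (s t : Int × Int × Int)
    (L : Nat) (hL0 : 0 < L) (hfix : f^[L] s = s) (h : pvReach f s t) :
    ∃ r : Nat, r < L ∧ f^[r] s = t := by
  obtain ⟨k, rfl⟩ := h
  exact ⟨k % L, Nat.mod_lt k hL0, (pvPeriodMod f s L hL0 hfix k).symm⟩

-- A's while loop on the set level: a fresh start traces its full cycle
theorem pvTraceS_spec (f : (Int × Int × Int) → (Int × Int × Int)) (L : Nat)
    (s : Int × Int × Int) (hL0 : 0 < L) (hfix : f^[L] s = s)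
    (hdist : ∀ a b : Nat, a < b → b < L → f^[a] s ≠ f^[b] s)
    (seen : PySem.Set (Int × Int × Int)) (hseen : ∀ k, k < L → f^[k] s ∉ seen)
    (fuel : Nat) (hfuel : L < fuel) (len : Int) :
    pvTraceS f fuel seen s len =
      (len + (L : Int), seen ++ (List.range L).map (fun k => f^[k] s)) := by
  suffices H : ∀ dj j, j ≤ L → L - j = dj → ∀ fl, dj < fl → ∀ ln : Int,
      pvTraceS f fl (seen ++ (List.range j).map (fun k => f^[k] s)) (f^[j] s) ln =
        (ln + ((L - j : Nat) : Int), seen ++ (List.range L).map (fun k => f^[k] s)) by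
    have h0 := H L 0 (by omega) (by omega) fuel (by omega) len
    simpa using h0
  intro dj
  induction dj with
  | zero =>
    intro j hjL hdj fl hfl ln
    have hj : j = L := by omega
    obtain ⟨fu, rfl⟩ : ∃ fu, fl = fu + 1 := ⟨fl - 1, by omega⟩
    have hmem : f^[j] s ∈ seen ++ (List.range j).map (fun k => f^[k] s) := by
      rw [hj, hfix]
      exact List.mem_append_right _ (List.mem_map.mpr ⟨0, List.mem_range.mpr hL0, by simp⟩)
    simp only [pvTraceS]
    rw [if_pos (show PySem.Set.contains (seen ++ (List.range j).map (fun k => f^[k] s))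
      (f^[j] s) = true from by simpa [PySem.Set.contains] using hmem)]
    rw [hj]
    simp
  | succ dj ih =>
    intro j hjL hdj fl hfl ln
    have hjL' : j < L := by omega
    obtain ⟨fu, rfl⟩ : ∃ fu, fl = fu + 1 := ⟨fl - 1, by omega⟩
    have hnmem : f^[j] s ∉ seen ++ (List.range j).map (fun k => f^[k] s) := by
      intro hmem
      rcases List.mem_append.mp hmem with h | h
      · exact hseen j hjL' h
      · obtain ⟨a, ha, he⟩ := List.mem_map.mp h
        exact hdist a j (List.mem_range.mp ha) hjL' he
    have hcon : List.contains (seen ++ (List.range j).map (fun k => f^[k] s)) (f^[j] s) = false := by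
      simpa using hnmem
    simp only [pvTraceS, PySem.Set.contains, hcon, Bool.false_eq_true, if_false]
    have hadd : PySem.Set.add (seen ++ (List.range j).map (fun k => f^[k] s)) (f^[j] s)
        = seen ++ (List.range (j + 1)).map (fun k => f^[k] s) := by
      simp only [PySem.Set.add, PySem.Set.contains, hcon, Bool.false_eq_true, if_false]
      rw [List.range_succ, List.map_append, List.append_assoc]
      simp
    rw [hadd, show f (f^[j] s) = f^[j + 1] s from (Function.iterate_succ_apply' f j s).symm]
    rw [ih (j + 1) (by omega) (by omega) fu (by omega) (ln + 1)]
    have : (ln + 1) + ((L - (j + 1) : Nat) : Int) = ln + ((L - j : Nat) : Int) := by omega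
    rw [this]

-- B's walk: some (cycle length) iff no strictly smaller state on the cycle
theorem pvWalk_spec (grid : List String) (n m : Int) (L : Nat) (s0 : Int × Int × Int)
    (hL0 : 0 < L) (hfix : (pvStepB grid n m)^[L] s0 = s0)
    (hmin : ∀ k, 0 < k → k < L → (pvStepB grid n m)^[k] s0 ≠ s0)
    (fuel : Nat) (hfuel : L ≤ fuel) :
    pvWalk grid n m fuel s0 s0 0 =
      (if (∀ k, k < L → 1 ≤ k → pvLt ((pvStepB grid n m)^[k] s0) s0 = false)
       then some (L : Int) else none) := by
  suffices H : ∀ dj j, 1 ≤ j → j ≤ L → L - j = dj → ∀ fl, dj < fl →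
      pvWalk grid n m fl s0 ((pvStepB grid n m)^[j - 1] s0) ((j : Int) - 1) =
        (if (∀ k, k < L → j ≤ k → pvLt ((pvStepB grid n m)^[k] s0) s0 = false)
         then some (L : Int) else none) by
    have h1 := H (L - 1) 1 le_rfl hL0 (by omega) fuel (by omega)
    simpa using h1
  intro dj
  induction dj with
  | zero =>
    intro j hj1 hjL hdj fl hfl
    have hj : j = L := by omega
    obtain ⟨fu, rfl⟩ : ∃ fu, fl = fu + 1 := ⟨fl - 1, by omega⟩
    have hstep : pvStepB grid n m ((pvStepB grid n m)^[j - 1] s0)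
        = (pvStepB grid n m)^[j] s0 := by
      conv_rhs => rw [show j = (j - 1) + 1 from by omega]
      rw [Function.iterate_succ_apply']
    have hfixj : (pvStepB grid n m)^[j] s0 = s0 := by rw [hj]; exact hfix
    simp only [pvWalk, hstep, hfixj, pvLt_irrefl, Bool.false_eq_true, if_false, if_pos rfl]
    rw [if_pos (show ∀ k, k < L → j ≤ k →
        pvLt ((pvStepB grid n m)^[k] s0) s0 = false from by intro k hk hlk; omega)]
    rw [if_pos trivial]
    congr 1
    omega
  | succ dj ih =>
    intro j hj1 hjL hdj fl hfl
    have hjL' : j < L := by omega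
    obtain ⟨fu, rfl⟩ : ∃ fu, fl = fu + 1 := ⟨fl - 1, by omega⟩
    have hstep : pvStepB grid n m ((pvStepB grid n m)^[j - 1] s0)
        = (pvStepB grid n m)^[j] s0 := by
      conv_rhs => rw [show j = (j - 1) + 1 from by omega]
      rw [Function.iterate_succ_apply']
    simp only [pvWalk, hstep]
    by_cases hlt : pvLt ((pvStepB grid n m)^[j] s0) s0 = true
    · have hcond : ¬ (∀ k, k < L → j ≤ k →
          pvLt ((pvStepB grid n m)^[k] s0) s0 = false) := by
        intro hall
        have h := hall j hjL' le_rfl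
        rw [h] at hlt
        simp at hlt
      rw [if_pos hlt, if_neg hcond]
    · have hlt' : pvLt ((pvStepB grid n m)^[j] s0) s0 = false := by
        cases hpv : pvLt ((pvStepB grid n m)^[j] s0) s0
        · rfl
        · exact absurd hpv hlt
      rw [if_neg hlt]
      by_cases heq : (pvStepB grid n m)^[j] s0 = s0
      · exact absurd heq (hmin j (by omega) hjL')
      · rw [if_neg heq]
        rw [show ((j : Int) - 1) + 1 = ((j + 1 : Nat) : Int) - 1 from by push_cast; ring]
        rw [show (pvStepB grid n m)^[j] s0 = (pvStepB grid n m)^[(j + 1) - 1] s0 from by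
          simp]
        rw [ih (j + 1) (by omega) (by omega) (by omega) fu (by omega)]
        refine if_congr ?_ rfl rfl
        constructor
        · intro h k hk hjk
          rcases Nat.eq_or_lt_of_le hjk with rfl | h2
          · exact hlt'
          · exact h k hk (by omega)
        · intro h k hk hjk
          exact h k hk (by omega)

-- visited-array / visited-set bridge (reused shapes)
theorem pvVis_mkVis (n m : Int) (seen : PySem.Set (Int × Int × Int))
    (s : Int × Int × Int) (hs : pvInR n m s) :
    pvVis (pvMkVis n m seen) s = PySem.Set.contains seen s := by
  obtain ⟨i, j, d⟩ := s
  obtain ⟨h1, h2, h3, h4, h5, h6⟩ := hs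
  simp only at h1 h2 h3 h4 h5 h6
  have hi : i.toNat < (n - 0).toNat := by omega
  have hj : j.toNat < (m - 0).toNat := by omega
  have hdn : d.toNat < ((4 : Int) - 0).toNat := by omega
  have e1 : (i.toNat : Int) = i := Int.toNat_of_nonneg h1
  have e2 : (j.toNat : Int) = j := Int.toNat_of_nonneg h3
  have e3 : (d.toNat : Int) = d := Int.toNat_of_nonneg h5
  simp only [pvVis, pvMkVis, PySem.List.pyGet?_of_nonneg _ h1,
    PySem.List.pyGet?_of_nonneg _ h3, PySem.List.pyGet?_of_nonneg _ h5,
    List.getElem?_map, PySem.List.getElem?_pyRange_one, hi, hj, hdn, if_pos,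
    zero_add, Option.map_some, Option.bind_some, Option.getD_some, e1, e2, e3]

theorem pvSet3_mkVis (n m : Int) (seen : PySem.Set (Int × Int × Int))
    (s : Int × Int × Int) (hs : pvInR n m s) :
    pvSet3 (pvMkVis n m seen) s = pvMkVis n m (PySem.Set.add seen s) := by
  obtain ⟨i, j, d⟩ := s
  obtain ⟨h1, h2, h3, h4, h5, h6⟩ := hs
  simp only at h1 h2 h3 h4 h5 h6
  apply List.ext_getElem?
  intro a
  simp only [pvSet3, pvMkVis]
  rw [List.getElem?_modify]
  simp only [Option.map_eq_map, List.getElem?_map, PySem.List.getElem?_pyRange_one, zero_add]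
  by_cases ha : a < (n - 0).toNat
  · simp only [ha, if_pos, Option.map_some, Option.some.injEq]
    by_cases hai : i.toNat = a
    · have eia : (a : Int) = i := by omega
      subst eia
      simp only [hai, if_pos]
      apply List.ext_getElem?
      intro b
      rw [List.getElem?_modify]
      simp only [Option.map_eq_map, List.getElem?_map, PySem.List.getElem?_pyRange_one, zero_add]
      by_cases hb : b < (m - 0).toNat
      · simp only [hb, if_pos, Option.map_some, Option.some.injEq]
        by_cases hbj : j.toNat = b
        · have ejb : (b : Int) = j := by omega
          subst ejb
          simp only [hbj, if_pos]
          apply List.ext_getElem?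
          intro c
          rw [List.getElem?_set]
          simp only [List.getElem?_map, PySem.List.getElem?_pyRange_one, zero_add,
            List.length_map, PySem.List.length_pyRange_one]
          by_cases hc : c < ((4 : Int) - 0).toNat
          · by_cases hcd : d.toNat = c
            · have edc : (c : Int) = d := by omega
              subst edc
              simp [hcd]
            · have edc : ((c : Int)) ≠ d := by omega
              simp [hcd, Prod.ext_iff, edc]
          · have hcd : d.toNat ≠ c := by omega
            have hc4 : ¬ c < 4 := by omega
            simp [hc4]
            omega
        · have hbj' : ((b : Int)) ≠ j := by omega
          simp [hbj, Prod.ext_iff, hbj']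
      · have hbm : ¬ ((b : Int) < m) := by omega
        simp [hbm]
    · have hai' : ((a : Int)) ≠ i := by omega
      simp [hai, Prod.ext_iff, hai']
  · have han : ¬ ((a : Int) < n) := by omega
    simp [han]

theorem pvLightMove_eq (grid : List String) (n m : Int) (fuel : Nat) :
    ∀ (seen : PySem.Set (Int × Int × Int)) (s : Int × Int × Int) (len : Int),
    pvInR n m s →
    pvLightMove grid n m fuel (pvMkVis n m seen) s len =
      ((pvTraceS (pvStepB grid n m) fuel seen s len).1,
       pvMkVis n m (pvTraceS (pvStepB grid n m) fuel seen s len).2) := by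
  induction fuel with
  | zero => intro seen s len _; simp [pvLightMove, pvTraceS]
  | succ fuel ih =>
    intro seen s len hs
    simp only [pvLightMove, pvTraceS, pvVis_mkVis n m seen s hs]
    by_cases hc : s ∈ seen
    · simp [PySem.Set.contains, hc]
    · have hcc : List.contains seen s = false := by simpa using hc
      simp only [PySem.Set.contains, hcc, Bool.false_eq_true, if_false]
      rw [pvSet3_mkVis n m seen s hs, pvStep_eq grid n m s hs]
      exact ih _ _ _ (pvStepB_inR grid n m s hs)

theorem pvMkVis_empty (n m : Int) :
    pvMkVis n m PySem.Set.empty =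
      List.replicate n.toNat (List.replicate m.toNat (List.replicate 4 false)) := by
  simp [pvMkVis, PySem.Set.empty, PySem.Set.contains, List.map_const',
    PySem.List.length_pyRange_one]

-- the main loop: A's discovery-order tracing = B's leader test, state by state
theorem pvMain (grid : List String) (n m : Int) (F : Nat)
    (hF : n.toNat * m.toNat * 4 < F) :
    ∀ (todo : List (Int × Int × Int)) (V : PySem.Set (Int × Int × Int))
      (ansA ansB : List Int),
    (∀ t ∈ todo, t ∈ pvStates n m) →
    todo.Pairwise (fun a b => pvLt a b = true) →
    (∀ t ∈ pvStates n m, t ∉ todo → ∀ u ∈ todo, pvLt t u = true) →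
    (∀ t, t ∈ V ↔ ∃ u, u ∈ pvStates n m ∧ u ∉ todo ∧ pvReach (pvStepB grid n m) u t) →
    ansA = ansB →
    (todo.foldl (fun (acc : List Int × PySem.Set (Int × Int × Int)) s =>
        if PySem.Set.contains acc.2 s then acc
        else
          let r := pvTraceS (pvStepB grid n m) F acc.2 s 0
          (acc.1 ++ [r.1], r.2)) (ansA, V)).1 =
      todo.foldl (fun (acc : List Int) s =>
        match pvWalk grid n m F s s 0 with
        | some len => acc ++ [len]
        | none => acc) ansB := by
  intro todo
  induction todo with
  | nil =>
    intro V ansA ansB _ _ _ _ h5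
    simpa using h5
  | cons s tl ih =>
    intro V ansA ansB h1 h2 h3 h4 h5
    have hsS : s ∈ pvStates n m := h1 s (List.mem_cons_self)
    have hsR : pvInR n m s := (pvMem_states n m s).mp hsS
    have hstl : s ∉ tl := by
      intro hmem
      have := (List.pairwise_cons.mp h2).1 s hmem
      rw [pvLt_irrefl] at this
      simp at this
    have h1' : ∀ t ∈ tl, t ∈ pvStates n m := fun t ht => h1 t (List.mem_cons_of_mem _ ht)
    have h2' : tl.Pairwise (fun a b => pvLt a b = true) := (List.pairwise_cons.mp h2).2
    have h3' : ∀ t ∈ pvStates n m, t ∉ tl → ∀ u' ∈ tl, pvLt t u' = true := by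
      intro t htS htn u' hu'
      by_cases hts : t = s
      · subst hts
        exact (List.pairwise_cons.mp h2).1 u' hu'
      · exact h3 t htS (by simp [List.mem_cons, hts, htn]) u' (List.mem_cons_of_mem _ hu')
    obtain ⟨L0, hL00, hL0len, hL0fix⟩ := pvExistsPeriod grid n m s hsR
    have hper : ∃ L : Nat, 0 < L ∧ (pvStepB grid n m)^[L] s = s := ⟨L0, hL00, hL0fix⟩
    set L := Nat.find hper with hLdef
    have hLpos : 0 < L := (Nat.find_spec hper).1
    have hLfix : (pvStepB grid n m)^[L] s = s := (Nat.find_spec hper).2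
    have hLle : L ≤ n.toNat * m.toNat * 4 := by
      have := Nat.find_min' hper ⟨hL00, hL0fix⟩
      omega
    have hmin : ∀ k, 0 < k → k < L → (pvStepB grid n m)^[k] s ≠ s := by
      intro k hk0 hkL he
      exact Nat.find_min hper hkL ⟨hk0, he⟩
    have hdist := pvDistinct grid n m s hsR L hmin
    simp only [List.foldl_cons]
    by_cases hv : s ∈ V
    · -- already visited: A skips, and B's walk meets a smaller state
      obtain ⟨u, huS, hut, hur⟩ := (h4 s).mp hv
      have hune : u ≠ s := fun he => hut (he ▸ List.mem_cons_self)
      have hsu : pvReach (pvStepB grid n m) s u :=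
        pvReach_symm grid n m u s ((pvMem_states n m u).mp huS) hur
      obtain ⟨r, hrL, hre⟩ := pvReach_orbit (pvStepB grid n m) s u L hLpos hLfix hsu
      have hr0 : r ≠ 0 := by
        intro h0
        rw [h0] at hre
        exact hune (by simpa using hre.symm)
      have hults : pvLt u s = true := h3 u huS hut s (List.mem_cons_self)
      have hwalk : pvWalk grid n m F s s 0 = none := by
        rw [pvWalk_spec grid n m L s hLpos hLfix hmin F (by omega)]
        rw [if_neg]
        intro hall
        have := hall r hrL (by omega)
        rw [hre, hults] at this
        simp at this
      have hcv : PySem.Set.contains V s = true := by simpa [PySem.Set.contains] using hv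
      have h4' : ∀ t, t ∈ V ↔
          ∃ u', u' ∈ pvStates n m ∧ u' ∉ tl ∧ pvReach (pvStepB grid n m) u' t := by
        intro t
        constructor
        · intro htV
          obtain ⟨u', a, b, c⟩ := (h4 t).mp htV
          exact ⟨u', a, fun hm => b (List.mem_cons_of_mem _ hm), c⟩
        · rintro ⟨u', hu'S, hu'tl, hu'r⟩
          by_cases hus : u' = s
          · rw [hus] at hu'r
            exact (h4 t).mpr ⟨u, huS, hut, pvReach_trans _ u s t hur hu'r⟩
          · exact (h4 t).mpr ⟨u', hu'S, by simp [List.mem_cons, hus, hu'tl], hu'r⟩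
      simp only [hcv, hwalk, if_true]
      exact ih V ansA ansB h1' h2' h3' h4' h5
    · -- fresh: A traces the full cycle, B's walk certifies s as leader
      have hcv : PySem.Set.contains V s = false := by simpa [PySem.Set.contains] using hv
      have hlead : ∀ k, k < L → 1 ≤ k → pvLt ((pvStepB grid n m)^[k] s) s = false := by
        intro k hkL hk1
        cases hpv : pvLt ((pvStepB grid n m)^[k] s) s with
        | false => rfl
        | true =>
          exfalso
          have huS : (pvStepB grid n m)^[k] s ∈ pvStates n m :=
            (pvMem_states n m _).mpr (pvIter_inR grid n m k s hsR)
          have hune : (pvStepB grid n m)^[k] s ≠ s := by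
            intro he
            exact hdist 0 k (by omega) hkL (by simpa using he.symm)
          by_cases hutl : (pvStepB grid n m)^[k] s ∈ tl
          · exact pvLt_asymm _ s hpv ((List.pairwise_cons.mp h2).1 _ hutl)
          · have hunt : (pvStepB grid n m)^[k] s ∉ s :: tl := by
              simp [List.mem_cons, hune, hutl]
            exact hv ((h4 s).mpr ⟨_, huS, hunt,
              pvReach_symm grid n m s _ hsR ⟨k, rfl⟩⟩)
      have hwalk : pvWalk grid n m F s s 0 = some (L : Int) := by
        rw [pvWalk_spec grid n m L s hLpos hLfix hmin F (by omega)]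
        exact if_pos (fun k hk h1k => hlead k hk h1k)
      have hseen : ∀ k, k < L → (pvStepB grid n m)^[k] s ∉ V := by
        intro k hkL hmem
        obtain ⟨u, huS, hunt, hur⟩ := (h4 _).mp hmem
        exact hv ((h4 s).mpr ⟨u, huS, hunt,
          pvReach_trans _ u _ s hur (pvReach_symm grid n m s _ hsR ⟨k, rfl⟩)⟩)
      have htr := pvTraceS_spec (pvStepB grid n m) L s hLpos hLfix hdist V hseen F
        (by omega) 0
      have h4'' : ∀ t, t ∈ V ++ (List.range L).map (fun k => (pvStepB grid n m)^[k] s) ↔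
          ∃ u', u' ∈ pvStates n m ∧ u' ∉ tl ∧ pvReach (pvStepB grid n m) u' t := by
        intro t
        rw [List.mem_append]
        constructor
        · rintro (h | h)
          · obtain ⟨u', a, b, c⟩ := (h4 t).mp h
            exact ⟨u', a, fun hm => b (List.mem_cons_of_mem _ hm), c⟩
          · obtain ⟨k, _, rfl⟩ := List.mem_map.mp h
            exact ⟨s, hsS, hstl, ⟨k, rfl⟩⟩
        · rintro ⟨u', hu'S, hu'tl, hu'r⟩
          by_cases hus : u' = s
          · rw [hus] at hu'r
            obtain ⟨r, hrL, hre⟩ := pvReach_orbit _ s t L hLpos hLfix hu'r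
            exact Or.inr (List.mem_map.mpr ⟨r, List.mem_range.mpr hrL, hre⟩)
          · exact Or.inl ((h4 t).mpr ⟨u', hu'S, by simp [List.mem_cons, hus, hu'tl], hu'r⟩)
      simp only [hcv, hwalk, Bool.false_eq_true, if_false, htr]
      have h5' : ansA ++ [(0 : Int) + (L : Int)] = ansB ++ [(L : Int)] := by
        rw [h5, zero_add]
      exact ih _ _ _ h1' h2' h3' h4'' h5'

theorem pvFoldl_rel {α β γ : Type} (R : β → γ → Prop) (f : β → α → β) (g : γ → α → γ)
    (L : List α) (h : ∀ b c x, x ∈ L → R b c → R (f b x) (g c x)) :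
    ∀ b c, R b c → R (L.foldl f b) (L.foldl g c) := by
  induction L with
  | nil => intro b c hbc; exact hbc
  | cons x t ih =>
    intro b c hbc
    exact ih (fun b c y hy => h b c y (List.mem_cons_of_mem _ hy))
      _ _ (h b c x (List.mem_cons_self) hbc)

theorem pvFoldl_flatten {β : Type} (n m : Int) (body : β → (Int × Int × Int) → β) (b : β) :
    (PySem.List.pyRange 0 n 1).foldl (fun acc i =>
      (PySem.List.pyRange 0 m 1).foldl (fun acc j =>
        (PySem.List.pyRange 0 4 1).foldl (fun acc d => body acc (i, j, d)) acc) acc) b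
    = (pvStates n m).foldl body b := by
  unfold pvStates
  simp only [List.foldl_flatMap, List.foldl_map]

-- ===== VERDICT (by name: the statement is the Claim_ definition above) =====
theorem solution_spec : Claim_equal_solution := by
  intro grid _ _
  unfold Spec_solution solution solution_alt
  set n : Int := (grid.length : Int) with hn
  set m : Int := PySem.Str.len ((PySem.List.pyGet? grid 0).getD "") with hm
  set F := n.toNat * m.toNat * 4 + 1 with hF
  have main :
      ∀ (b : List Int × List (List (List Bool))) (c : List Int × PySem.Set (Int × Int × Int)),
        b.1 = c.1 ∧ b.2 = pvMkVis n m c.2 →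
        ((PySem.List.pyRange 0 n 1).foldl (fun acc i =>
          (PySem.List.pyRange 0 m 1).foldl (fun acc j =>
            (PySem.List.pyRange 0 4 1).foldl
              (fun (acc : List Int × List (List (List Bool))) k =>
                if pvVis acc.2 (i, j, k) then acc
                else
                  let r := pvLightMove grid n m F acc.2 (i, j, k) 0
                  (acc.1 ++ [r.1], r.2)) acc) acc) b).1 =
        ((PySem.List.pyRange 0 n 1).foldl (fun acc i =>
          (PySem.List.pyRange 0 m 1).foldl (fun acc j =>
            (PySem.List.pyRange 0 4 1).foldl
              (fun (acc : List Int × PySem.Set (Int × Int × Int)) k =>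
                if PySem.Set.contains acc.2 (i, j, k) then acc
                else
                  let r := pvTraceS (pvStepB grid n m) F acc.2 (i, j, k) 0
                  (acc.1 ++ [r.1], r.2)) acc) acc) c).1 := by
    intro b c hbc
    refine (pvFoldl_rel (fun b c => b.1 = c.1 ∧ b.2 = pvMkVis n m c.2) _ _ _
      ?_ b c hbc).1
    intro b c i hi hbc
    rw [PySem.List.mem_pyRange_one] at hi
    refine pvFoldl_rel (fun b c => b.1 = c.1 ∧ b.2 = pvMkVis n m c.2) _ _ _
      ?_ b c hbc
    intro b c j hj hbc
    rw [PySem.List.mem_pyRange_one] at hj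
    refine pvFoldl_rel (fun b c => b.1 = c.1 ∧ b.2 = pvMkVis n m c.2) _ _ _
      ?_ b c hbc
    intro b c k hk hbc
    rw [PySem.List.mem_pyRange_one] at hk
    have hinr : pvInR n m (i, j, k) := ⟨hi.1, hi.2, hj.1, hj.2, hk.1, hk.2⟩
    obtain ⟨hb1, hb2⟩ := hbc
    rw [hb2, pvVis_mkVis n m c.2 (i, j, k) hinr]
    by_cases hc : (i, j, k) ∈ c.2
    · have hct : PySem.Set.contains c.2 (i, j, k) = true := by
        simpa [PySem.Set.contains] using hc
      simp [hct, hc, hb1, hb2]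
    · have hcf : PySem.Set.contains c.2 (i, j, k) = false := by
        simpa [PySem.Set.contains] using hc
      simp only [hcf, Bool.false_eq_true, if_false, if_neg hc]
      rw [pvLightMove_eq grid n m F c.2 (i, j, k) 0 hinr]
      exact ⟨by rw [hb1], rfl⟩
  have hA := main
    ([], List.replicate n.toNat (List.replicate m.toNat (List.replicate 4 false)))
    ([], PySem.Set.empty) ⟨rfl, (pvMkVis_empty n m).symm⟩
  have hmain := pvMain grid n m F (by omega) (pvStates n m) PySem.Set.empty [] []
    (fun t ht => ht) (pvStates_pairwise n m)
    (fun t htS htn => (htn htS).elim)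
    (by
      intro t
      constructor
      · intro h
        simp [PySem.Set.empty] at h
      · rintro ⟨u, a, b, _⟩
        exact absurd a b)
    rfl
  refine congrArg (fun l => PySem.List.sorted l (fun x => x) false) ?_
  rw [hA]
  rw [pvFoldl_flatten n m (fun (acc : List Int × PySem.Set (Int × Int × Int)) s =>
      if PySem.Set.contains acc.2 s then acc
      else
        let r := pvTraceS (pvStepB grid n m) F acc.2 s 0
        (acc.1 ++ [r.1], r.2)) ([], PySem.Set.empty)]
  rw [pvFoldl_flatten n m (fun (acc : List Int) s =>
      match pvWalk grid n m F s s 0 with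
      | some len => acc ++ [len]
      | none => acc) []]
  exact hmain
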